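-- pv_equiv track=rewrite | github.com/luismi98/astrophysics-research | utils/miscellaneous_functions.py | get_number_decimals
-- ===== SOURCE A (Python) =====
-- def get_number_decimals(x):
--     x_string = str(x)
--     after_dot = 0
--     count_bool = False
--     for i in range(len(x_string)):
--         if count_bool:
--             after_dot += 1
--         if x_string[i] == '.':
--             count_bool = True
--     return after_dot
-- ===== SOURCE B (Python) =====
-- def get_number_decimals(x):
--     s = str(x)
--     i = s.find('.')
--     return 0 if i < 0 else len(s) - i - 1
-- ===== Notes on version B (the rewrite author's own statement) =====
-- stated objective: simpler
-- what changed: Replaces the explicit per-character scan with an accumulator and a boolean flag by a single find of the first dot plus length arithmetic.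
import Mathlib
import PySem

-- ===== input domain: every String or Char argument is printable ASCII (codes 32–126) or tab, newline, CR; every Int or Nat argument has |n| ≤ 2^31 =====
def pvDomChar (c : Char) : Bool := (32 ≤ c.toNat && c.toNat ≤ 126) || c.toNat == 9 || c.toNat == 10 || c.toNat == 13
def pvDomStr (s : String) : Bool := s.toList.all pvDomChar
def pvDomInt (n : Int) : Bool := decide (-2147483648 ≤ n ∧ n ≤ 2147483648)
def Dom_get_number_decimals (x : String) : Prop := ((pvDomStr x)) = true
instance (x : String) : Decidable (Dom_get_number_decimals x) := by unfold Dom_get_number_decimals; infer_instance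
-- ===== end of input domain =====

-- B replaces A's scan-with-flag by a single find of the first dot plus length arithmetic (simpler).

-- ===== PORT A =====
-- one loop step: 'if count_bool: after_dot += 1' then 'if x_string[i] == ".": count_bool = True'
def pvStepA (st : Int × Bool) (c : Char) : Int × Bool :=
  let st1 := if st.2 then (st.1 + 1, st.2) else st
  if c = '.' then (st1.1, true) else st1

def get_number_decimals (x : String) : Int :=
  let s := x.toList
  ((PySem.List.pyRange 0 (PySem.Str.len x) 1).foldl
      (fun st i => pvStepA st (PySem.List.pyGetD s i ' ')) ((0 : Int), false)).1

-- ===== PORT B =====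
def get_number_decimals_alt (x : String) : Int :=
  let i := PySem.Str.find x "."
  if i < 0 then 0 else PySem.Str.len x - i - 1

-- ===== PRECONDITION & SPEC =====
def Spec_get_number_decimals (x : String) (out : Int) : Prop := out = get_number_decimals_alt x
instance (x : String) (out : Int) : Decidable (Spec_get_number_decimals x out) := by unfold Spec_get_number_decimals; infer_instance

-- ===== CLAIM (what is proved, stated in full; the proofs are below) =====
def Claim_equal_get_number_decimals : Prop := ∀ (x : String), Dom_get_number_decimals x → Spec_get_number_decimals x (get_number_decimals x)

-- ===== LEMMAS AND PROOFS =====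

-- once the flag is true, every remaining character adds one
lemma pv_fold_true (l : List Char) (a : Int) :
    l.foldl pvStepA (a, true) = (a + l.length, true) := by
  induction l generalizing a with
  | nil => simp
  | cons c t ih =>
    simp only [List.foldl_cons, pvStepA]
    by_cases h : c = '.' <;> simp [h, ih (a + 1)] <;> ring

-- no dot: the state never changes
lemma pv_fold_false_nodot (l : List Char) (a : Int) (h : '.' ∉ l) :
    l.foldl pvStepA (a, false) = (a, false) := by
  induction l with
  | nil => simp
  | cons c t ih =>
    simp only [List.mem_cons, not_or] at h
    simp only [List.foldl_cons]
    have hc : ¬ c = '.' := fun e => h.1 e.symm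
    have hst : pvStepA (a, false) c = (a, false) := by
      simp [pvStepA, hc]
    rw [hst, ih h.2]

-- with a first dot: the result counts exactly the characters after it
lemma pv_fold_false_dot (pre suf : List Char) (a : Int) (h : '.' ∉ pre) :
    (pre ++ '.' :: suf).foldl pvStepA (a, false) = (a + suf.length, true) := by
  induction pre generalizing a with
  | nil =>
    simp only [List.nil_append, List.foldl_cons, pvStepA]
    simp [pv_fold_true]
  | cons c t ih =>
    simp only [List.mem_cons, not_or] at h
    simp only [List.cons_append, List.foldl_cons]
    have hc : ¬ c = '.' := fun e => h.1 e.symm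
    have hst : pvStepA (a, false) c = (a, false) := by
      simp [pvStepA, hc]
    rw [hst, ih a h.2]

-- decomposition of a list at its first dot, as named by Chars.find
lemma pv_find_decomp (l : List Char) (h : '.' ∈ l) :
    ∃ pre suf : List Char, l = pre ++ '.' :: suf ∧ '.' ∉ pre ∧
      PySem.Chars.find l ['.'] = (pre.length : Int) := by
  have hinf : ['.'] <:+: l := by
    obtain ⟨s, t, hst⟩ := List.append_of_mem h
    exact ⟨s, t, by simpa using hst.symm⟩
  have hnn : 0 ≤ PySem.Chars.find l ['.'] := (PySem.Chars.find_nonneg_iff l ['.']).2 hinf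
  obtain ⟨hpre, hmin⟩ := PySem.Chars.find_spec (s := l) (sub := ['.']) hnn
  set k := (PySem.Chars.find l ['.']).toNat with hk
  obtain ⟨t, ht⟩ := hpre
  have hklen : k < l.length := by
    by_contra hge
    have : l.drop k = [] := List.drop_eq_nil_of_le (by omega)
    rw [this] at ht; simp at ht
  refine ⟨l.take k, t, ?_, ?_, ?_⟩
  · have := List.take_append_drop k l
    rw [← ht] at this
    simpa using this.symm
  · intro hmem
    obtain ⟨i, hi, hgi⟩ := List.getElem_of_mem hmem
    have hik : i < k := by
      have := hi; simp at this; omega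
    have hil : i < l.length := by omega
    have hli : l[i] = '.' := by
      rw [← hgi]; exact (List.getElem_take).symm
    exact hmin i hik ⟨l.drop (i + 1), by
      rw [List.drop_eq_getElem_cons hil, hli]; simp⟩
  · have : (l.take k).length = k := by simp; omega
    rw [this, hk]
    exact (Int.toNat_of_nonneg hnn).symm

-- ===== VERDICT (by name: the statement is the Claim_ definition above) =====
theorem get_number_decimals_spec : Claim_equal_get_number_decimals := by
  intro x _
  unfold Spec_get_number_decimals get_number_decimals get_number_decimals_alt
  simp only [PySem.Str.len_eq, PySem.Str.find_eq]
  rw [show ("." : String).toList = ['.'] from rfl]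
  rw [PySem.List.foldl_pyRange_zero_pyGetD' x.toList ' ' pvStepA ((0 : Int), false)]
  by_cases h : '.' ∈ x.toList
  · obtain ⟨pre, suf, hl, hnp, hf⟩ := pv_find_decomp x.toList h
    rw [hl] at hf
    rw [hl, pv_fold_false_dot pre suf 0 hnp, hf]
    have hnneg : ¬ ((pre.length : Int) < 0) := by
      simp
    rw [if_neg hnneg]
    simp only [List.length_append, List.length_cons]
    push_cast
    ring
  · rw [pv_fold_false_nodot x.toList 0 h]
    have hne : PySem.Chars.find x.toList ['.'] = -1 :=
      (PySem.Chars.find_eq_neg_one_iff _ _).2 (by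
        intro hinf
        exact h (hinf.subset (by simp)))
    rw [hne]
    norm_num
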